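/- GENERATED by mk_final_copies.py from the proof of the farm's unit `__asan_store1_noabort` (farm:__asan_store1_noabort.1: Proof.lean) as the
   re-elaboration sweep compiled it — do not edit. -/
import Asan.CheckWalk
import Vorbis.Spec.Units.asan_store1_noabort

open X86 X86.User Asan Vorbis

set_option maxRecDepth 4000
set_option maxHeartbeats 4000000

/-- `__asan_store1_noabort` (0x1003c0, asan_rt.c:88 `SMALL_CHECK(1)`) satisfies its contract `Asan.SmallCheck`: entered with an
accessible byte it returns, changing only rax rdx rsp and the flags; its paths into `__asan_report` are infeasible from
`AccessibleSmall`. -/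
theorem Vorbis.Spec.Worked.asan_store1_noabort_ok : Vorbis.Spec.asan_store1_noabort.Statement := by
  intro Lay hLay μ hμ u₀ hcode
  refine SmallCheck.mk' (by omega) (by decide) ?_
  intro u ret hrip hcodeOK hsp hret hretlt hacc
  obtain ⟨hsealed, hceil, hA⟩ := hacc
  -- the one shadow byte the routine looks at (0x1003d0, asan_rt.c:27), and what `Accessible` says of it
  have hs1 := shadowOf_lt u.mem ((u.reg .rdi).toNat / 8)
  have hlast := hA.last_ok
  have e1 : (u.reg .rdi).toNat + 1 - 1 = (u.reg .rdi).toNat := by omega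
  rw [e1] at hlast
  have r1 : u.mem.readLE (u.reg .rdi >>> 3 + 12582912) 1 = shadowOf u.mem ((u.reg .rdi).toNat / 8) := readLE_shadow _ _
  generalize shadowOf u.mem ((u.reg .rdi).toNat / 8) = s1 at *
  -- (a fact about the vector registers, so that the walk tracks them: `Checked.zmm`)
  have hzmm : u.zmm = u.zmm := rfl
  -- one walk of all paths, from the entry 0x1003c0 to the `ret` at 0x1003e4 or the `call __asan_report` at 0x1003f3
  u_walk hcode [hμ.vendor] span [Vorbis.L.textLo, Vorbis.L.textHi] side (v_side)
  all_goals first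
    | -- a returning path (0x1003e4): the state after the `ret` is `Checked`
      (refine ReachVia.done ⟨w_rip, w_rsp, RegsKept.mono_all w_kept (by rfl), w_mem, w_zmm, w_mxcsr, ?_⟩
       rw [w_flags]
       exact X86.User.df_setStatus _ _)
    | -- the failing path (0x1003e5 … 0x1003f3, its side conditions and the state at `__asan_report`): infeasible, the byte
      -- is accessible
      (exfalso
       simp only [byte_toNat _ hs1, byte_toInt _ hs1, and7_toInt, part32_toNat] at *
       omega)
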